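-- pv_equiv track=rewrite | github.com/blemay360/CS-UY-1114 | Labs/lab8/lab8.py | anagramTest
-- ===== SOURCE A (Python) =====
-- def anagramTest(a, b):
-- 	if (len(a) > len(b)):
-- 		return False;
-- 	b=list(b);
-- 	for char in a:
-- 		if (a.count(char) > b.count(char)):
-- 			return False;
-- 	return True
-- ===== SOURCE B (Python) =====
-- def anagramTest(a, b):
--     sa = sorted(a)
--     sb = sorted(b)
--     j = 0
--     n = len(sb)
--     for ch in sa:
--         while j < n and sb[j] < ch:
--             j += 1
--         if j >= n or sb[j] != ch:
--             return False
--         j += 1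
--     return True
-- ===== Notes on version B (the rewrite author's own statement) =====
-- stated objective: alternative
-- what changed: replaces the repeated count() scans (quadratic rescans of both strings per character) by sorting both strings once and running a single two-pointer merge pass that matches each character of sorted(a) against sorted(b)
import Mathlib
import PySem

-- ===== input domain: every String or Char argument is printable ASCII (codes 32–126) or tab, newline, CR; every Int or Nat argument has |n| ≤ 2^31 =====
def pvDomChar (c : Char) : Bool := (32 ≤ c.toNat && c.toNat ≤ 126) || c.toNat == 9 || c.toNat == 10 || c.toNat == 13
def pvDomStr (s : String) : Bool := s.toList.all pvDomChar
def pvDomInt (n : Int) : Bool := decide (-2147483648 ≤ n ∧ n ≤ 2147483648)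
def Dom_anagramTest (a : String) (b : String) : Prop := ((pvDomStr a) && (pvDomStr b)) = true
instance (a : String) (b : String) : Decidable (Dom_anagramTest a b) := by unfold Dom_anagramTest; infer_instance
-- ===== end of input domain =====

-- B replaces A's repeated count() scans by sorting both strings once and doing a single
-- two-pointer merge pass (objective: alternative algorithm of similar size).

-- ===== PORT A =====
-- 'for char in a: if a.count(char) > b.count(char): return False'
def anagramTestLoop (al bl : List Char) : List Char → Bool
  | [] => true
  | c :: rest =>
      if PySem.List.count al c > PySem.List.count bl c then false
      else anagramTestLoop al bl rest

def anagramTest (a : String) (b : String) : Bool :=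
  if PySem.Str.len a > PySem.Str.len b then false
  else anagramTestLoop a.toList b.toList a.toList

-- ===== PORT B =====
-- the two-pointer walk over the two sorted lists ('while j < n and sb[j] < ch: j += 1; …'),
-- expressed as structural recursion on the remaining suffixes
def anagramTestMerge : List Char → List Char → Bool
  | [], _ => true
  | _ :: _, [] => false
  | c :: cs, y :: ys =>
      if y < c then anagramTestMerge (c :: cs) ys
      else if y = c then anagramTestMerge cs ys
      else false

def anagramTest_alt (a : String) (b : String) : Bool :=
  anagramTestMerge (PySem.List.sorted a.toList (fun x => x) false)
                   (PySem.List.sorted b.toList (fun x => x) false)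

-- ===== PRECONDITION & SPEC =====
def Spec_anagramTest (a : String) (b : String) (out : Bool) : Prop := out = anagramTest_alt a b
instance (a : String) (b : String) (out : Bool) : Decidable (Spec_anagramTest a b out) := by unfold Spec_anagramTest; infer_instance

-- ===== CLAIM (what is proved, stated in full; the proofs are below) =====
def Claim_equal_anagramTest : Prop := ∀ (a : String) (b : String), Dom_anagramTest a b → Spec_anagramTest a b (anagramTest a b)

-- ===== LEMMAS AND PROOFS =====

theorem anagramTestLoop_true_iff (al bl : List Char) (l : List Char) :
    anagramTestLoop al bl l = true ↔ ∀ c ∈ l, al.count c ≤ bl.count c := by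
  induction l with
  | nil => simp [anagramTestLoop]
  | cons c rest ih =>
      simp only [anagramTestLoop, PySem.List.count_eq]
      split_ifs with h
      · simp only [false_iff]
        intro hall
        exact absurd (hall c (List.mem_cons_self)) (by omega)
      · simp only [ih, List.mem_cons]
        constructor
        · rintro hall d (rfl | hd)
          · omega
          · exact hall d hd
        · intro hall d hd; exact hall d (Or.inr hd)

theorem anagramTestMerge_true_iff (sa sb : List Char)
    (ha : sa.Pairwise (· ≤ ·)) (hb : sb.Pairwise (· ≤ ·)) :
    anagramTestMerge sa sb = true ↔ ∀ c : Char, sa.count c ≤ sb.count c := by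
  induction sb generalizing sa with
  | nil =>
      cases sa with
      | nil => simp [anagramTestMerge]
      | cons c cs =>
          rw [show anagramTestMerge (c :: cs) [] = false from rfl]
          simp only [Bool.false_eq_true, false_iff, not_forall]
          exact ⟨c, by simp⟩
  | cons y ys ih =>
      cases sa with
      | nil => simp [anagramTestMerge]
      | cons c cs =>
          have ha' : cs.Pairwise (· ≤ ·) := ha.of_cons
          have hb' : ys.Pairwise (· ≤ ·) := hb.of_cons
          simp only [anagramTestMerge]
          split_ifs with h1 h2
          · -- y < c : y occurs nowhere in c :: cs; drop y from sb
            rw [ih (c :: cs) ha hb']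
            constructor
            · intro hall d
              calc (c :: cs).count d ≤ ys.count d := hall d
                _ ≤ (y :: ys).count d := by
                    by_cases hd : d = y <;> simp [List.count_cons, hd]
            · intro hall d
              rcases eq_or_ne d y with rfl | hd
              · have hz : (c :: cs).count d = 0 := by
                  rw [List.count_eq_zero]
                  intro hmem
                  rcases List.mem_cons.mp hmem with rfl | hmem
                  · exact absurd h1 (lt_irrefl _)
                  · exact absurd (List.rel_of_pairwise_cons ha hmem) (not_le_of_gt h1)
                simp [hz]
              · calc (c :: cs).count d ≤ (y :: ys).count d := hall d
                  _ = ys.count d := List.count_cons_of_ne (Ne.symm hd)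
          · -- y = c : consume both heads
            subst h2
            rw [ih cs ha' hb']
            constructor
            · intro hall d
              have h := hall d
              rcases eq_or_ne d y with rfl | hd
              · simp only [List.count_cons_self]; omega
              · simp only [List.count_cons_of_ne (Ne.symm hd)]; exact h
            · intro hall d
              have h := hall d
              rcases eq_or_ne d y with rfl | hd
              · simp only [List.count_cons_self] at h; omega
              · simp only [List.count_cons_of_ne (Ne.symm hd)] at h; exact h
          · -- c < y : c cannot occur in y :: ys
            have hcy : c < y := lt_of_le_of_ne (not_lt.mp h1) (fun h => h2 h.symm)
            simp only [false_iff, not_forall]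
            refine ⟨c, ?_⟩
            have hz : (y :: ys).count c = 0 := by
              rw [List.count_eq_zero]
              intro hmem
              rcases List.mem_cons.mp hmem with rfl | hmem
              · exact absurd hcy (lt_irrefl _)
              · exact absurd (List.rel_of_pairwise_cons hb hmem) (not_le_of_gt hcy)
            simp [hz]

theorem anagramTest_alt_true_iff (a b : String) :
    anagramTest_alt a b = true ↔ ∀ c : Char, a.toList.count c ≤ b.toList.count c := by
  unfold anagramTest_alt
  rw [anagramTestMerge_true_iff _ _
        (by simpa using PySem.List.sorted_pairwise a.toList (fun x => x))
        (by simpa using PySem.List.sorted_pairwise b.toList (fun x => x))]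
  constructor
  · intro h c
    have := h c
    rwa [(PySem.List.sorted_perm a.toList (fun x => x) false).count_eq,
         (PySem.List.sorted_perm b.toList (fun x => x) false).count_eq] at this
  · intro h c
    rw [(PySem.List.sorted_perm a.toList (fun x => x) false).count_eq,
        (PySem.List.sorted_perm b.toList (fun x => x) false).count_eq]
    exact h c

theorem anagramTest_true_iff (a b : String) :
    anagramTest a b = true ↔ ∀ c : Char, a.toList.count c ≤ b.toList.count c := by
  unfold anagramTest
  constructor
  · intro h
    split_ifs at h with hlen
    rw [anagramTestLoop_true_iff] at h
    intro c
    by_cases hc : c ∈ a.toList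
    · exact h c hc
    · simp [List.count_eq_zero_of_not_mem hc]
  · intro h
    have hsub : List.Subperm a.toList b.toList :=
      List.subperm_ext_iff.mpr (fun c _ => h c)
    have hlen : a.toList.length ≤ b.toList.length := hsub.length_le
    rw [if_neg (by rw [not_lt]; simp only [PySem.Str.len_eq]; exact_mod_cast hlen)]
    rw [anagramTestLoop_true_iff]
    exact fun c _ => h c

-- ===== VERDICT (by name: the statement is the Claim_ definition above) =====
theorem anagramTest_spec : Claim_equal_anagramTest := by
  intro a b _
  unfold Spec_anagramTest
  rcases hB : anagramTest_alt a b with _ | _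
  · rcases hA : anagramTest a b with _ | _
    · rfl
    · exact absurd ((anagramTest_alt_true_iff a b).mpr ((anagramTest_true_iff a b).mp hA))
        (by simp [hB])
  · exact (anagramTest_true_iff a b).mpr ((anagramTest_alt_true_iff a b).mp hB)
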